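-- pv_equiv track=rewrite | github.com/abhisheksharma007/LeetCode-Problems | longest_rept_substr_424.py | longest_rep_char
-- ===== SOURCE A (Python) =====
-- def longest_rep_char(s, k):
--     curr_res = 0
--     res = 0
--     for i in range(len(s)):
--         curr_res = 1
--         j, n = i+1, k
--         temp_str = s[i]
--         while j < len(s):
--             if s[j] == temp_str:
--                 curr_res += 1
--             else:
--                 if n == 0:
--                     break
--                 curr_res += 1
--                 n -= 1
--             j += 1
--         if curr_res > res:
--             res = curr_res
--
--     return res
-- ===== SOURCE B (Python) =====
-- def longest_rep_char(s, k):
--     # Per-character mismatch-position lists; for each start, the reachable end is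
--     # the (k+1)-th mismatch after it (or the end of the string), found by arithmetic.
--     n = len(s)
--     res = 0
--     for c in set(s):
--         occs = [p for p in range(n) if s[p] == c]
--         mism = [p for p in range(n) if s[p] != c]
--         for t, i in enumerate(occs):
--             idx = i - t  # number of mismatches (w.r.t. c) at positions <= i
--             length = mism[idx + k] - i if idx + k < len(mism) else n - i
--             res = max(res, length)
--     return res
-- ===== Notes on version B (the rewrite author's own statement) =====
-- stated objective: faster
-- what changed: Replaces the per-start inner scan by precomputed per-character mismatch-position lists: for each start the reachable end is read off as the (k+1)-th mismatch after it via an arithmetic index (occurrence rank), no inner loop; Pre_ excludes negative k, a replacement budget outside the task's natural domain, where A's decrement-until-zero budget never stops and it scans to the end of the string.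
-- outside the precondition, e.g. on longest_rep_char('ab', -1): A returns 2, B returns 1
import Mathlib
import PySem

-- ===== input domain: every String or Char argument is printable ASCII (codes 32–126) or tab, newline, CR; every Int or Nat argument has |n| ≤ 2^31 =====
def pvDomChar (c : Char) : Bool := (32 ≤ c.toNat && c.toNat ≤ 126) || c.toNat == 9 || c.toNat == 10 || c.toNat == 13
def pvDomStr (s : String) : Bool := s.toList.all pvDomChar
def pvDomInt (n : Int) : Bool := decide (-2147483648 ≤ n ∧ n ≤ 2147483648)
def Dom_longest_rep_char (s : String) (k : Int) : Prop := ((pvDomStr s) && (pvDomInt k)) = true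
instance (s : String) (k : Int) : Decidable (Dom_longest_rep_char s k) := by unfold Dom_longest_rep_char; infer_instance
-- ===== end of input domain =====

-- B replaces A's per-start inner scan by per-character mismatch-position lists,
-- reading each start's reachable end off as the (k+1)-th mismatch after it (objective: faster).

-- ===== PORT A =====
-- A's inner 'while j < len(s)' loop; j is always in range where s[j] is read, so getD is exact.
def pvInnerA (cs : List Char) (temp : Char) (j : Nat) (n : Int) (curr : Int) : Int :=
  if _h : j < cs.length then
    if cs.getD j ' ' = temp then pvInnerA cs temp (j + 1) n (curr + 1)
    else if n = 0 then curr
    else pvInnerA cs temp (j + 1) (n - 1) (curr + 1)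
  else curr
termination_by cs.length - j

def longest_rep_char (s : String) (k : Int) : Int :=
  let cs := s.toList
  (List.range cs.length).foldl (fun res i =>
    let curr := pvInnerA cs (cs.getD i ' ') (i + 1) k 1
    if curr > res then curr else res) 0

-- ===== PORT B =====
-- B iterates over set(s); the result is a max over all its elements, so it does not depend
-- on the (unmodelled) set iteration order.
def longest_rep_char_alt (s : String) (k : Int) : Int :=
  let cs := s.toList
  let n : Int := cs.length
  (PySem.Set.ofList cs).foldl (fun res c =>
    let occs : List Int := ((List.range cs.length).filter (fun p => cs.getD p ' ' == c)).map Int.ofNat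
    let mism : List Int := ((List.range cs.length).filter (fun p => cs.getD p ' ' != c)).map Int.ofNat
    (PySem.List.enumerate occs).foldl (fun res ti =>
      let idx := ti.2 - ti.1
      let length := if idx + k < (mism.length : Int) then PySem.List.pyGetD mism (idx + k) 0 - ti.2 else n - ti.2
      max res length) res) 0

-- ===== PRECONDITION & SPEC =====
-- Pre_ excludes negative k: a negative replacement budget is outside the task's natural
-- domain; A's decrement-until-zero loop never stops there and scans to the end of the string.
def Pre_longest_rep_char (s : String) (k : Int) : Prop := 0 ≤ k
instance (s : String) (k : Int) : Decidable (Pre_longest_rep_char s k) := by unfold Pre_longest_rep_char; infer_instance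
def pvWitness_longest_rep_char : String × Int := ("ab", 1)

def Spec_longest_rep_char (s : String) (k : Int) (out : Int) : Prop := out = longest_rep_char_alt s k
instance (s : String) (k : Int) (out : Int) : Decidable (Spec_longest_rep_char s k out) := by unfold Spec_longest_rep_char; infer_instance

-- ===== CLAIM (what is proved, stated in full; the proofs are below) =====
def Claim_equal_longest_rep_char : Prop := ∀ (s : String) (k : Int), Dom_longest_rep_char s k → Pre_longest_rep_char s k → Spec_longest_rep_char s k (longest_rep_char s k)

-- ===== LEMMAS AND PROOFS =====

-- mismatch positions of char c in cs (increasing), occurrence positions, and the count of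
-- mismatch positions < j
def pvM (cs : List Char) (c : Char) : List Nat := (List.range cs.length).filter (fun p => cs.getD p ' ' != c)
def pvO (cs : List Char) (c : Char) : List Nat := (List.range cs.length).filter (fun p => cs.getD p ' ' == c)
def pvCnt (cs : List Char) (c : Char) (j : Nat) : Nat := ((pvM cs c).filter (· < j)).length
-- the per-start value A computes (closed form proved in pvG_eq)
def pvG (cs : List Char) (k : Int) (i : Nat) : Int := pvInnerA cs (cs.getD i ' ') (i + 1) k 1

theorem pvM_def (cs : List Char) (c : Char) :
    (List.range cs.length).filter (fun p => cs.getD p ' ' != c) = pvM cs c := rfl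

theorem pvO_def (cs : List Char) (c : Char) :
    (List.range cs.length).filter (fun p => cs.getD p ' ' == c) = pvO cs c := rfl

theorem pvM_pairwise (cs : List Char) (c : Char) : (pvM cs c).Pairwise (· < ·) :=
  List.Pairwise.filter _ List.pairwise_lt_range

theorem pvO_pairwise (cs : List Char) (c : Char) : (pvO cs c).Pairwise (· < ·) :=
  List.Pairwise.filter _ List.pairwise_lt_range

theorem mem_pvM (cs : List Char) (c : Char) (p : Nat) :
    p ∈ pvM cs c ↔ p < cs.length ∧ cs.getD p ' ' ≠ c := by
  simp [pvM, List.mem_filter, List.mem_range]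

theorem mem_pvO (cs : List Char) (c : Char) (p : Nat) :
    p ∈ pvO cs c ↔ p < cs.length ∧ cs.getD p ' ' = c := by
  simp [pvO, List.mem_filter, List.mem_range]

-- counting in a strictly increasing list of naturals
theorem sorted_filter_lt_len (l : List Nat) (hl : l.Pairwise (· < ·)) (j : Nat) (hj : j ∈ l) :
    (l.filter (· < j)).length < l.length := by
  induction l with
  | nil => cases hj
  | cons x tl IH =>
    rw [List.pairwise_cons] at hl
    rcases List.mem_cons.mp hj with rfl | hj'
    · simp only [List.length_cons]
      have : (tl.filter (· < j)).length ≤ tl.length := List.length_filter_le _ _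
      have h0 : (List.filter (· < j) (j :: tl)).length ≤ tl.length := by
        rw [List.filter_cons_of_neg (by simp)]
        exact this
      omega
    · have hxj : x < j := hl.1 j hj'
      have := IH hl.2 hj'
      rw [List.filter_cons_of_pos (by simp only [decide_eq_true_eq]; omega)]
      simpa using this

theorem sorted_filter_lt_succ (l : List Nat) (hl : l.Pairwise (· < ·)) (j : Nat) (hj : j ∈ l) :
    (l.filter (· < j + 1)).length = (l.filter (· < j)).length + 1 := by
  induction l with
  | nil => cases hj
  | cons x tl IH =>
    rw [List.pairwise_cons] at hl
    rcases List.mem_cons.mp hj with rfl | hj'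
    · have h1 : tl.filter (· < j + 1) = [] :=
        List.filter_eq_nil_iff.mpr (fun y hy => by
          have := hl.1 y hy; simp only [decide_eq_true_eq]; omega)
      have h2 : tl.filter (· < j) = [] :=
        List.filter_eq_nil_iff.mpr (fun y hy => by
          have := hl.1 y hy; simp only [decide_eq_true_eq]; omega)
      rw [List.filter_cons_of_pos (by simp only [decide_eq_true_eq]; omega),
          List.filter_cons_of_neg (by simp), h1, h2]
      rfl
    · have hxj : x < j := hl.1 j hj'
      rw [List.filter_cons_of_pos (by simp only [decide_eq_true_eq]; omega),
          List.filter_cons_of_pos (by simp only [decide_eq_true_eq]; omega),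
          List.length_cons, List.length_cons, IH hl.2 hj']

theorem sorted_getD_filter_lt (l : List Nat) (hl : l.Pairwise (· < ·)) (j : Nat) (hj : j ∈ l) :
    l.getD ((l.filter (· < j)).length) 0 = j := by
  induction l with
  | nil => cases hj
  | cons x tl IH =>
    rw [List.pairwise_cons] at hl
    rcases List.mem_cons.mp hj with rfl | hj'
    · have h2 : tl.filter (· < j) = [] :=
        List.filter_eq_nil_iff.mpr (fun y hy => by
          have := hl.1 y hy; simp only [decide_eq_true_eq]; omega)
      rw [List.filter_cons_of_neg (by simp), h2]
      rfl
    · have hxj : x < j := hl.1 j hj'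
      rw [List.filter_cons_of_pos (by simp only [decide_eq_true_eq]; omega),
          List.length_cons, List.getD_cons_succ, IH hl.2 hj']

theorem sorted_filter_lt_getElem (l : List Nat) (hl : l.Pairwise (· < ·)) (t : Nat) (ht : t < l.length) :
    (l.filter (· < l[t])).length = t := by
  induction l generalizing t with
  | nil => simp at ht
  | cons x tl IH =>
    rw [List.pairwise_cons] at hl
    cases t with
    | zero =>
      have h2 : (x :: tl).filter (· < x) = [] :=
        List.filter_eq_nil_iff.mpr (fun y hy => by
          rcases List.mem_cons.mp hy with rfl | hy'
          · simp
          · have := hl.1 y hy'; simp only [decide_eq_true_eq]; omega)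
      simp only [List.getElem_cons_zero]
      simpa using congrArg List.length h2
    | succ t =>
      have ht' : t < tl.length := by simpa using ht
      have hmem : tl[t] ∈ tl := List.getElem_mem ht'
      have hx : x < tl[t] := hl.1 _ hmem
      have := IH hl.2 t ht'
      simp only [List.getElem_cons_succ]
      rw [List.filter_cons_of_pos (by simp only [decide_eq_true_eq]; omega), List.length_cons]
      exact congrArg Nat.succ this

theorem filter_lt_range (n j : Nat) (h : j ≤ n) : (List.range n).filter (· < j) = List.range j := by
  induction n with
  | zero =>
    have : j = 0 := by omega
    subst this; rfl
  | succ n IH =>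
    rw [List.range_succ, List.filter_append]
    rcases Nat.lt_or_ge j (n + 1) with h1 | h1
    · have hj : j ≤ n := by omega
      rw [IH hj]
      simp only [List.filter_cons, List.filter_nil]
      rw [if_neg (by simp; omega)]
      simp
    · have hje : j = n + 1 := by omega
      subst hje
      rw [List.filter_eq_self.mpr (fun y hy => by
        have := List.mem_range.mp hy; simp only [decide_eq_true_eq]; omega)]
      simp only [List.filter_cons, List.filter_nil]
      rw [if_pos (by simp)]
      rw [← List.range_succ]

theorem pvCnt_len (cs : List Char) (c : Char) : pvCnt cs c cs.length = (pvM cs c).length := by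
  unfold pvCnt
  rw [List.filter_eq_self.mpr]
  intro y hy
  have := (mem_pvM cs c y).mp hy
  simp only [decide_eq_true_eq]
  omega

theorem pvCnt_succ_match (cs : List Char) (c : Char) (j : Nat)
    (h : cs.getD j ' ' = c) : pvCnt cs c (j + 1) = pvCnt cs c j := by
  unfold pvCnt
  rw [List.filter_congr]
  intro y hy
  have hy' := (mem_pvM cs c y).mp hy
  have : y ≠ j := by rintro rfl; exact hy'.2 h
  simp only [decide_eq_decide]
  omega

-- positions below j split into occurrences and mismatches
theorem pvCnt_add_occ (cs : List Char) (c : Char) (j : Nat) (hj : j ≤ cs.length) :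
    pvCnt cs c j + ((pvO cs c).filter (· < j)).length = j := by
  unfold pvCnt pvM pvO
  rw [List.filter_comm, List.filter_comm _ (fun p => cs.getD p ' ' == c), filter_lt_range _ _ hj]
  have h := List.length_eq_length_filter_add (l := List.range j) (fun p => cs.getD p ' ' == c)
  rw [List.length_range] at h
  have he : (List.range j).filter (fun p => cs.getD p ' ' != c)
      = (List.range j).filter (fun p => !(cs.getD p ' ' == c)) := by
    apply List.filter_congr
    intro y _
    simp [bne]
  rw [he]
  omega

-- A's inner loop in closed form: stops at the (n+1)-th mismatch after j, or at the end
theorem pvInnerA_eq_aux (cs : List Char) (c : Char) (d : Nat) : ∀ j, cs.length - j = d → j ≤ cs.length →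
    ∀ (n curr : Int),
    pvInnerA cs c j n curr =
      curr - j + (if 0 ≤ n ∧ pvCnt cs c j + n.toNat < (pvM cs c).length
                  then ((pvM cs c).getD (pvCnt cs c j + n.toNat) 0 : Int)
                  else (cs.length : Int)) := by
  induction d with
  | zero =>
    intro j hd hj n curr
    have hje : j = cs.length := by omega
    subst hje
    rw [pvInnerA, dif_neg (by omega)]
    rw [pvCnt_len, if_neg (by omega)]
    ring
  | succ d IH =>
    intro j hd hj n curr
    have hjlt : j < cs.length := by omega
    rw [pvInnerA, dif_pos hjlt]
    by_cases hc : cs.getD j ' ' = c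
    · rw [if_pos hc, IH (j + 1) (by omega) (by omega) n (curr + 1), pvCnt_succ_match cs c j hc]
      push_cast
      ring
    · rw [if_neg hc]
      have hjm : j ∈ pvM cs c := (mem_pvM cs c j).mpr ⟨hjlt, hc⟩
      have hlen : pvCnt cs c j < (pvM cs c).length := sorted_filter_lt_len _ (pvM_pairwise cs c) j hjm
      have hgd : (pvM cs c).getD (pvCnt cs c j) 0 = j := sorted_getD_filter_lt _ (pvM_pairwise cs c) j hjm
      have hsucc : pvCnt cs c (j + 1) = pvCnt cs c j + 1 := sorted_filter_lt_succ _ (pvM_pairwise cs c) j hjm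
      by_cases hn : n = 0
      · subst hn
        rw [if_pos rfl, if_pos ⟨le_refl 0, by simpa using hlen⟩]
        simp only [Int.toNat_zero, Nat.add_zero, hgd]
        ring
      · rw [if_neg hn, IH (j + 1) (by omega) (by omega) (n - 1) (curr + 1), hsucc]
        by_cases hn0 : 0 ≤ n
        · have hidx : pvCnt cs c j + 1 + (n - 1).toNat = pvCnt cs c j + n.toNat := by omega
          rw [hidx]
          have hcond : (0 ≤ n - 1 ∧ pvCnt cs c j + n.toNat < (pvM cs c).length) ↔
              (0 ≤ n ∧ pvCnt cs c j + n.toNat < (pvM cs c).length) := by omega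
          by_cases hC : 0 ≤ n ∧ pvCnt cs c j + n.toNat < (pvM cs c).length
          · rw [if_pos (hcond.mpr hC), if_pos hC]; push_cast; ring
          · rw [if_neg (fun h => hC (hcond.mp h)), if_neg hC]; push_cast; ring
        · rw [if_neg (by omega), if_neg (by omega)]
          push_cast
          ring

-- the value A computes for start i, in closed form
theorem pvG_eq (cs : List Char) (k : Int) (i : Nat) (hi : i < cs.length) :
    pvG cs k i =
      (if 0 ≤ k ∧ pvCnt cs (cs.getD i ' ') (i + 1) + k.toNat < (pvM cs (cs.getD i ' ')).length
       then ((pvM cs (cs.getD i ' ')).getD (pvCnt cs (cs.getD i ' ') (i + 1) + k.toNat) 0 : Int)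
       else (cs.length : Int)) - i := by
  unfold pvG
  rw [pvInnerA_eq_aux cs (cs.getD i ' ') (cs.length - (i + 1)) (i + 1) rfl (by omega) k 1]
  push_cast
  ring

-- A as a fold of max over pvG
theorem pvA_fold (s : String) (k : Int) :
    longest_rep_char s k =
      (List.range s.toList.length).foldl (fun r i => max r (pvG s.toList k i)) 0 := by
  unfold longest_rep_char
  apply PySem.List.foldl_congr_mem
  intro r i _
  unfold pvG
  dsimp only
  rw [Int.max_def]
  split_ifs <;> omega

-- B's inner fold over one character, rewritten to a fold of max ∘ pvG over pvO
theorem getD_map_ofNat (l : List Nat) (m : Nat) (h : m < l.length) :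
    (l.map Int.ofNat).getD m 0 = (l.getD m 0 : Int) := by
  rw [List.getD_eq_getElem _ _ (by simpa using h), List.getD_eq_getElem _ _ h, List.getElem_map]
  rfl

theorem pvB_inner (cs : List Char) (k : Int) (hk : 0 ≤ k) (c : Char) (r0 : Int) :
    (PySem.List.enumerate ((pvO cs c).map Int.ofNat)).foldl
      (fun res ti =>
        max res (if (ti.2 - ti.1) + k < (((pvM cs c).map Int.ofNat).length : Int)
                 then PySem.List.pyGetD ((pvM cs c).map Int.ofNat) ((ti.2 - ti.1) + k) 0 - ti.2
                 else (cs.length : Int) - ti.2)) r0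
    = (pvO cs c).foldl (fun r p => max r (pvG cs k p)) r0 := by
  rw [PySem.List.foldl_congr_mem _ _ (fun res ti => max res (pvG cs k ti.2.toNat)) r0 ?_]
  · have h1 := List.foldl_map (f := fun (x : Int × Int) => x.2)
      (g := fun res v => max res (pvG cs k v.toNat))
      (l := PySem.List.enumerate ((pvO cs c).map Int.ofNat) 0) (init := r0)
    rw [← h1, PySem.List.map_snd_enumerate, List.foldl_map]
    apply PySem.List.foldl_congr_mem
    intro acc p _
    simp
  · intro res ti hti
    rw [PySem.List.mem_enumerate_iff] at hti
    obtain ⟨t, ht, rfl⟩ := hti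
    rw [List.getElem_map]
    have htlen : t < (pvO cs c).length := by simpa using ht
    set p : Nat := (pvO cs c)[t] with hp
    have hpm : p ∈ pvO cs c := List.getElem_mem htlen
    have hplen : p < cs.length := ((mem_pvO cs c p).mp hpm).1
    have hpc : cs.getD p ' ' = c := ((mem_pvO cs c p).mp hpm).2
    have ht' : ((pvO cs c).filter (· < p)).length = t := sorted_filter_lt_getElem _ (pvO_pairwise cs c) t htlen
    have hsucc : ((pvO cs c).filter (· < p + 1)).length = t + 1 := by
      rw [sorted_filter_lt_succ _ (pvO_pairwise cs c) p hpm, ht']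
    have hcnt := pvCnt_add_occ cs c (p + 1) (by omega)
    rw [hsucc] at hcnt
    have hidx : ((p : Int) : Int) - (0 + (t : Int)) = (pvCnt cs c (p + 1) : Int) := by
      omega
    have hG : pvG cs k p =
        (if 0 ≤ k ∧ pvCnt cs c (p + 1) + k.toNat < (pvM cs c).length
         then ((pvM cs c).getD (pvCnt cs c (p + 1) + k.toNat) 0 : Int)
         else (cs.length : Int)) - p := by
      have := pvG_eq cs k p hplen
      rwa [hpc] at this
    congr 1
    rw [show (Int.ofNat p).toNat = p from rfl, hG]
    by_cases hC : pvCnt cs c (p + 1) + k.toNat < (pvM cs c).length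
    · rw [if_pos (⟨hk, hC⟩ : 0 ≤ k ∧ pvCnt cs c (p + 1) + k.toNat < (pvM cs c).length)]
      rw [if_pos ((by
        rw [show Int.ofNat p - (0 + (t:Int)) = ((p:Int) - (0 + (t:Int))) from rfl, hidx]
        simp only [List.length_map]; omega) :
        Int.ofNat p - (0 + (t : Int)) + k < (((pvM cs c).map Int.ofNat).length : Int))]
      have harg : (Int.ofNat p) - (0 + (t : Int)) + k = ((pvCnt cs c (p + 1) + k.toNat : Nat) : Int) := by
        simp only [Int.ofNat_eq_natCast]; push_cast; omega
      rw [harg, PySem.List.pyGetD_natCast, getD_map_ofNat _ _ hC]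
      simp [Int.ofNat_eq_natCast]
    · rw [if_neg ((fun h => hC h.2) :
        ¬ (0 ≤ k ∧ pvCnt cs c (p + 1) + k.toNat < (pvM cs c).length))]
      rw [if_neg ((by
        intro hK
        apply hC
        rw [show Int.ofNat p - (0 + (t:Int)) = ((p:Int) - (0 + (t:Int))) from rfl, hidx] at hK
        simp only [List.length_map] at hK
        omega) :
        ¬ (Int.ofNat p - (0 + (t : Int)) + k < (((pvM cs c).map Int.ofNat).length : Int)))]
      simp [Int.ofNat_eq_natCast]

-- a fold of per-character folds is a fold over the flatMap
theorem foldl_foldl_flatMap {α β γ : Type} (f : γ → β → γ) (h : α → List β) :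
    ∀ (l : List α) (r0 : γ),
      l.foldl (fun r c => (h c).foldl f r) r0 = (l.flatMap h).foldl f r0 := by
  intro l
  induction l with
  | nil => intro r0; rfl
  | cons x tl IH =>
    intro r0
    rw [List.flatMap_cons, List.foldl_append, List.foldl_cons, IH]

-- the occurrence lists of the distinct characters partition the positions
theorem pvPerm (cs : List Char) :
    ((PySem.Set.ofList cs).flatMap (pvO cs)).Perm (List.range cs.length) := by
  apply (List.perm_ext_iff_of_nodup ?_ List.nodup_range).mpr
  · intro x
    rw [List.mem_flatMap, List.mem_range]
    constructor
    · rintro ⟨c, _, hx⟩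
      exact ((mem_pvO cs c x).mp hx).1
    · intro hx
      refine ⟨cs.getD x ' ', ?_, (mem_pvO cs _ x).mpr ⟨hx, rfl⟩⟩
      rw [PySem.Set.mem_ofList]
      rw [List.getD_eq_getElem _ _ hx]
      exact List.getElem_mem hx
  · rw [List.nodup_flatMap]
    constructor
    · intro c _
      exact (pvO_pairwise cs c).imp (fun h => Nat.ne_of_lt h)
    · apply (PySem.Set.nodup_ofList cs).imp
      intro c c' hcc x hx hx'
      exact hcc (((mem_pvO cs c x).mp hx).2 ▸ ((mem_pvO cs c' x).mp hx').2 ▸ rfl)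

theorem longest_rep_char_spec' : ∀ (s : String) (k : Int), 0 ≤ k →
    longest_rep_char s k = longest_rep_char_alt s k := by
  intro s k hk
  rw [pvA_fold]
  unfold longest_rep_char_alt
  dsimp only
  simp only [pvM_def, pvO_def]
  rw [PySem.List.foldl_congr_mem _ _
      (fun res c => (pvO s.toList c).foldl (fun r p => max r (pvG s.toList k p)) res) 0
      (fun res c _ => pvB_inner s.toList k hk c res)]
  rw [foldl_foldl_flatMap]
  exact ((pvPerm s.toList).foldl_eq' (fun x _ y _ z => max_right_comm z (pvG s.toList k x) (pvG s.toList k y)) 0).symm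

-- ===== VERDICT (by name: the statement is the Claim_ definition above) =====
theorem longest_rep_char_spec : Claim_equal_longest_rep_char := by
  intro s k _ hk
  exact longest_rep_char_spec' s k hk
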